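-- pv_equiv track=rewrite | github.com/estape11/reconocimientopatrones | Tarea4/SVM/svm.py | ttn
-- ===== SOURCE A (Python) =====
-- def ttn(matConfu, clase):
-- 	numClases = len(matConfu[0])
-- 	temp = 0
-- 	for j in range (0, numClases):
-- 		if j != clase :
-- 			for k in range(0, numClases):
-- 				if k != clase :
-- 					temp+=matConfu[j][k]
--
-- 	return temp
-- ===== SOURCE B (Python) =====
-- def ttn(matConfu, clase):
--     n = len(matConfu[0])
--     total = sum(matConfu[j][k] for j in range(n) for k in range(n))
--     if 0 <= clase < n:
--         rowSum = sum(matConfu[clase][k] for k in range(n))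
--         colSum = sum(matConfu[j][clase] for j in range(n))
--         return total - rowSum - colSum + matConfu[clase][clase]
--     return total
-- ===== Notes on version B (the rewrite author's own statement) =====
-- stated objective: alternative
-- what changed: Replaces the masked double loop (skip row/column clase cell-by-cell) with a full-matrix sum plus inclusion-exclusion: total - rowSum - colSum + diagonal when clase is a valid index.
-- outside the precondition, e.g. on ttn([[1, 2], [3]], 1): A returns 1, B raises IndexError
import Mathlib
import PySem

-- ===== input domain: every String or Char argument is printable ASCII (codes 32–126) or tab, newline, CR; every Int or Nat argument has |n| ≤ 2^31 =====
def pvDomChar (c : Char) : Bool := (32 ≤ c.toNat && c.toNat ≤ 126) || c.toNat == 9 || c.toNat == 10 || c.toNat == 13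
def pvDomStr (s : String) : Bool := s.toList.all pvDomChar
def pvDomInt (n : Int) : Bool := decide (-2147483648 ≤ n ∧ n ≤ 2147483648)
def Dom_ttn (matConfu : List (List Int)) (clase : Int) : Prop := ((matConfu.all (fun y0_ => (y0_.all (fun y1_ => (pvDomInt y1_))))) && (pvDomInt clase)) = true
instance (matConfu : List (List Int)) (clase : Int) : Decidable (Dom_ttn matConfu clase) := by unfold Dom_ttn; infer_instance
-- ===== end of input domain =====

-- B replaces A's masked double loop by a full-matrix sum with inclusion–exclusion
-- (total - row clase - column clase + diagonal cell); alternative algorithm, same cost.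

-- matConfu[j][k] (both ports index cells this way; default only reached outside Pre_ttn)
def pvCell (matConfu : List (List Int)) (j k : Int) : Int :=
  PySem.List.pyGetD (PySem.List.pyGetD matConfu j []) k 0

-- ===== PORT A =====
def ttn (matConfu : List (List Int)) (clase : Int) : Int :=
  let numClases : Int := ((PySem.List.pyGetD matConfu 0 []).length : Int)
  (PySem.List.pyRange 0 numClases 1).foldl
    (fun temp j =>
      if j ≠ clase then
        (PySem.List.pyRange 0 numClases 1).foldl
          (fun temp k => if k ≠ clase then temp + pvCell matConfu j k else temp) temp
      else temp) 0

-- ===== PORT B =====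
def ttn_alt (matConfu : List (List Int)) (clase : Int) : Int :=
  let n : Int := ((PySem.List.pyGetD matConfu 0 []).length : Int)
  let total := ((PySem.List.pyRange 0 n 1).map (fun j =>
    ((PySem.List.pyRange 0 n 1).map (fun k => pvCell matConfu j k)).sum)).sum
  if 0 ≤ clase ∧ clase < n then
    let rowSum := ((PySem.List.pyRange 0 n 1).map (fun k => pvCell matConfu clase k)).sum
    let colSum := ((PySem.List.pyRange 0 n 1).map (fun j => pvCell matConfu j clase)).sum
    total - rowSum - colSum + pvCell matConfu clase clase
  else total

-- ===== PRECONDITION & SPEC =====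
-- Pre_ttn excludes the empty matrix (A raises IndexError there) and ragged matrices whose
-- full n×n block (n = len(matConfu[0])) is not present: on some of those A still returns
-- (it never reads row/column clase) while B's inclusion–exclusion reads every cell and raises.
def Pre_ttn (matConfu : List (List Int)) (clase : Int) : Prop :=
  matConfu ≠ [] ∧ (matConfu.headD []).length ≤ matConfu.length ∧
    ∀ row ∈ matConfu.take (matConfu.headD []).length, (matConfu.headD []).length ≤ row.length
instance (matConfu : List (List Int)) (clase : Int) : Decidable (Pre_ttn matConfu clase) := by
  unfold Pre_ttn; infer_instance

def pvWitness_ttn : List (List Int) × Int := ([[1, 2], [3, 4]], 0)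

def Spec_ttn (matConfu : List (List Int)) (clase : Int) (out : Int) : Prop := out = ttn_alt matConfu clase
instance (matConfu : List (List Int)) (clase : Int) (out : Int) : Decidable (Spec_ttn matConfu clase out) := by unfold Spec_ttn; infer_instance

-- ===== CLAIM (what is proved, stated in full; the proofs are below) =====
def Claim_equal_ttn : Prop := ∀ (matConfu : List (List Int)) (clase : Int), Dom_ttn matConfu clase → Pre_ttn matConfu clase → Spec_ttn matConfu clase (ttn matConfu clase)

-- ===== LEMMAS AND PROOFS =====

-- a masked accumulating fold is a sum of masked terms
theorem pvFoldIf (r : List Int) (c : Int) (f : Int → Int) (a : Int) :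
    r.foldl (fun t x => if x ≠ c then t + f x else t) a
      = a + (r.map (fun x => if x ≠ c then f x else 0)).sum := by
  induction r generalizing a with
  | nil => simp
  | cons x r ih =>
    simp only [List.foldl_cons, List.map_cons, List.sum_cons, ih]
    split_ifs <;> ring

theorem pvSumMaskNotMem (r : List Int) (c : Int) (hc : c ∉ r) (f : Int → Int) :
    (r.map (fun x => if x ≠ c then f x else 0)).sum = (r.map f).sum := by
  congr 1
  refine List.map_congr_left fun x hx => if_pos ?_
  intro h
  exact hc (h ▸ hx)

theorem pvSumMaskMem (r : List Int) (c : Int) (hnd : r.Nodup) (hc : c ∈ r) (f : Int → Int) :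
    (r.map (fun x => if x ≠ c then f x else 0)).sum = (r.map f).sum - f c := by
  induction r with
  | nil => cases hc
  | cons x r ih =>
    rcases List.nodup_cons.mp hnd with ⟨hxr, hnd'⟩
    by_cases hxc : x = c
    · subst hxc
      rw [List.map_cons, List.map_cons, List.sum_cons, List.sum_cons,
        if_neg (fun h => h rfl), pvSumMaskNotMem r x hxr f]
      ring
    · have hcr : c ∈ r := by
        rcases List.mem_cons.mp hc with h | h
        · exact absurd h.symm hxc
        · exact h
      rw [List.map_cons, List.map_cons, List.sum_cons, List.sum_cons, if_pos hxc, ih hnd' hcr]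
      ring

theorem pvSumSub (r : List Int) (f g : Int → Int) :
    (r.map (fun x => f x - g x)).sum = (r.map f).sum - (r.map g).sum := by
  induction r with
  | nil => simp
  | cons x r ih => simp only [List.map_cons, List.sum_cons, ih]; ring

-- ===== VERDICT (by name: the statement is the Claim_ definition above) =====
theorem ttn_spec : Claim_equal_ttn := by
  intro matConfu clase _ _
  unfold Spec_ttn ttn ttn_alt
  simp only [pvFoldIf]
  set n : Int := ((PySem.List.pyGetD matConfu 0 []).length : Int) with hn
  set R := PySem.List.pyRange 0 n 1 with hR
  have hnd : R.Nodup := hR ▸ PySem.List.nodup_pyRange_one 0 n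
  by_cases hc : 0 ≤ clase ∧ clase < n
  · have hcR : clase ∈ R := by
      rw [hR, PySem.List.mem_pyRange_one]; exact hc
    rw [if_pos hc]
    simp only [pvSumMaskMem R clase hnd hcR, pvSumSub]
    ring
  · have hcR : clase ∉ R := by
      rw [hR, PySem.List.mem_pyRange_one]; exact hc
    rw [if_neg hc]
    simp only [pvSumMaskNotMem R clase hcR]
    ring
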